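-- pv_equiv track=rewrite | github.com/Matistr/programas-python | edx.Hito2.p1.py | jerigonzo
-- ===== SOURCE A (Python) =====
-- def jerigonzo(string):
--     translado = ""
--     for letra in string:
--         if letra in "AEIOUaeiou":
--             translado += letra
--             translado += "p"
--         translado += letra
--     return translado
-- ===== SOURCE B (Python) =====
-- def jerigonzo(string):
--     for v in "AEIOUaeiou":
--         string = string.replace(v, v + "p" + v)
--     return string
-- ===== Notes on version B (the rewrite author's own statement) =====
-- stated objective: alternative
-- what changed: Instead of one accumulating pass that branches per character, B performs ten staged whole-string passes, one str.replace per vowel, each expanding that vowel to its three-character expansion; correct because distinct vowels' occurrences are disjoint and an expansion only introduces the already-processed vowel plus a consonant that no later pass touches.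
import Mathlib
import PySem

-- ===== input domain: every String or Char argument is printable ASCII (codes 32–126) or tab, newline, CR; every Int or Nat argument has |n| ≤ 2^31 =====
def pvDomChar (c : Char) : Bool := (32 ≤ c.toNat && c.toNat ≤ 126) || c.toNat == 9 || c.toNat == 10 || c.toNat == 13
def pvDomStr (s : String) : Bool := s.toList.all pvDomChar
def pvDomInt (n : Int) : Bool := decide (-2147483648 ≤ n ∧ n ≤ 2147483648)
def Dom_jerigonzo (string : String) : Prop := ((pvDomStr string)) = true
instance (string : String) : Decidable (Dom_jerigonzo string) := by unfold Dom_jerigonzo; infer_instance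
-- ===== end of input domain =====

-- B replaces A's single accumulating pass with ten staged str.replace passes (one per vowel); alternative decomposition, same cost.


-- ===== PORT A =====
def jerigonzo (string : String) : String :=
  String.ofList (string.toList.foldl
    (fun translado letra =>
      if ("AEIOUaeiou".toList.contains letra) then
        (translado ++ [letra] ++ ['p']) ++ [letra]
      else
        translado ++ [letra])
    [])

-- ===== PORT B =====
-- ten staged passes: for each vowel v, string = string.replace(v, v + "p" + v)
def jerigonzo_alt (string : String) : String :=
  "AEIOUaeiou".toList.foldl
    (fun s v => PySem.Str.replace s (String.ofList [v]) (String.ofList [v, 'p', v]))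
    string

-- ===== PRECONDITION & SPEC =====
def Spec_jerigonzo (string : String) (out : String) : Prop := out = jerigonzo_alt string
instance (string : String) (out : String) : Decidable (Spec_jerigonzo string out) := by unfold Spec_jerigonzo; infer_instance

-- ===== CLAIM (what is proved, stated in full; the proofs are below) =====
def Claim_equal_jerigonzo : Prop := ∀ (string : String), Dom_jerigonzo string → Spec_jerigonzo string (jerigonzo string)

-- ===== LEMMAS AND PROOFS =====

-- per-character expansion over a vowel list (proof vocabulary only)
def jeriExpandSet (vs : List Char) (c : Char) : List Char :=
  if c ∈ vs then [c, 'p', c] else [c]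

-- A's loop accumulates exactly the per-character expansion
theorem jeri_foldl (l : List Char) (acc : List Char) :
    l.foldl (fun translado letra =>
      if ("AEIOUaeiou".toList.contains letra) then
        (translado ++ [letra] ++ ['p']) ++ [letra]
      else
        translado ++ [letra]) acc
    = acc ++ l.flatMap (jeriExpandSet "AEIOUaeiou".toList) := by
  induction l generalizing acc with
  | nil => simp
  | cons c t ih =>
    rw [List.foldl_cons]
    by_cases h : ("AEIOUaeiou".toList.contains c) = true
    · rw [if_pos h, ih]
      simp only [List.flatMap_cons, jeriExpandSet]
      rw [if_pos (by simpa using h)]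
      simp
    · rw [if_neg h, ih]
      simp only [List.flatMap_cons, jeriExpandSet]
      rw [if_neg (by simpa using h)]
      simp

-- single-character replace is an elementwise flatMap
theorem replace_go_single (v : Char) (new : List Char) :
    ∀ (l acc : List Char) (fuel : Nat), l.length ≤ fuel →
      PySem.Chars.replace.go [v] new fuel l acc
        = acc.reverse ++ l.flatMap (fun c => if c = v then new else [c]) := by
  intro l
  induction l with
  | nil =>
    intro acc fuel _
    cases fuel <;> simp [PySem.Chars.replace.go]
  | cons c t ih =>
    intro acc fuel hf
    cases fuel with
    | zero => simp at hf
    | succ n =>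
      rw [PySem.Chars.replace.go]
      by_cases h : c = v
      · subst h
        rw [if_pos (by simp [List.isPrefixOf])]
        simp only [List.length_cons, List.length_nil, Nat.zero_add, List.drop_succ_cons,
          List.drop_zero]
        rw [ih (new.reverse ++ acc) n (by simpa using hf)]
        simp
      · rw [if_neg (by simp [List.isPrefixOf]; exact fun h' => h h'.symm)]
        rw [ih (c :: acc) n (by simpa using hf)]
        simp [h]

theorem replace_single (v : Char) (new : List Char) (l : List Char) :
    PySem.Chars.replace l [v] new = l.flatMap (fun c => if c = v then new else [c]) := by
  rw [PySem.Chars.replace]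
  simp only [List.isEmpty_cons, if_neg Bool.false_ne_true]
  exact replace_go_single v new l [] l.length le_rfl

-- composing one pass with the remaining passes, per character
theorem jeri_elem_step (v : Char) (vs : List Char) (hv : v ∉ vs) (hp : 'p' ∉ vs) (c : Char) :
    ((if c = v then [v, 'p', v] else [c]).flatMap (jeriExpandSet vs))
      = jeriExpandSet (v :: vs) c := by
  by_cases h : c = v
  · subst h
    simp [jeriExpandSet, List.flatMap_cons, if_neg hv, if_neg hp]
  · simp [jeriExpandSet, List.flatMap_cons, List.mem_cons, h]

-- the staged passes over a list of distinct non-'p' vowels expand every vowel once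
theorem staged_passes (vs : List Char) (hnd : vs.Nodup) (hp : 'p' ∉ vs) :
    ∀ (l : List Char),
      vs.foldl (fun s v => PySem.Chars.replace s [v] [v, 'p', v]) l
        = l.flatMap (jeriExpandSet vs) := by
  induction vs with
  | nil =>
    intro l
    rw [List.foldl_nil]
    exact ((List.flatMap_congr (l := l)
      (fun c _ => show jeriExpandSet [] c = [c] by simp [jeriExpandSet])).trans (by simp)).symm
  | cons v vs ih =>
    intro l
    have hv : v ∉ vs := (List.nodup_cons.mp hnd).1
    have hp' : 'p' ∉ vs := fun h => hp (List.mem_cons_of_mem _ h)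
    rw [List.foldl_cons, replace_single, ih (List.nodup_cons.mp hnd).2 hp',
      List.flatMap_assoc]
    exact List.flatMap_congr (fun c _ => jeri_elem_step v vs hv hp' c)

theorem alt_toList (s : String) :
    (jerigonzo_alt s).toList = s.toList.flatMap (jeriExpandSet "AEIOUaeiou".toList) := by
  unfold jerigonzo_alt
  have h : ∀ (vs : List Char) (t : String),
      (vs.foldl (fun s v => PySem.Str.replace s (String.ofList [v]) (String.ofList [v, 'p', v])) t).toList
        = vs.foldl (fun cs v => PySem.Chars.replace cs [v] [v, 'p', v]) t.toList := by
    intro vs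
    induction vs with
    | nil => intro t; rfl
    | cons v vs ih =>
      intro t
      rw [List.foldl_cons, List.foldl_cons, ih]
      congr 1
      simp [PySem.Str.replace]
  rw [h, staged_passes _ (by decide) (by decide)]

-- ===== VERDICT (by name: the statement is the Claim_ definition above) =====
theorem jerigonzo_spec : Claim_equal_jerigonzo := by
  intro s _
  unfold Spec_jerigonzo
  have hA : (jerigonzo s).toList = s.toList.flatMap (jeriExpandSet "AEIOUaeiou".toList) := by
    unfold jerigonzo
    rw [jeri_foldl]
    simp
  have hB := alt_toList s
  have ht : (jerigonzo s).toList = (jerigonzo_alt s).toList := hA.trans hB.symm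
  calc jerigonzo s = String.ofList (jerigonzo s).toList := by simp
    _ = String.ofList (jerigonzo_alt s).toList := by rw [ht]
    _ = jerigonzo_alt s := by simp
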